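-- pv_equiv track=rewrite | github.com/namahano/HTB-Rank-Calculator | htb_calculator/rank_solver.py | filter_and_sort_combinations
-- ===== SOURCE A (Python) =====
-- def filter_and_sort_combinations(combinations):
--     if not combinations:
--         return []
--
--     sorted_combinations = sorted(combinations, key=lambda x: (x[0] + x[1] + x[2], x[0], x[1], x[2], x[3]))
--
--     filtered_combinations = []
--     last_key = None
--     for s, u, c, perc in sorted_combinations:
--         current_key = (s, u, c)
--         if last_key != current_key:
--             filtered_combinations.append((s, u, c, perc))
--             last_key = current_key
--     return filtered_combinations
-- ===== SOURCE B (Python) =====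
-- def filter_and_sort_combinations(combinations):
--     # Group by (s, u, c) in one pass, keeping the smallest perc per triple,
--     # then sort the one representative per triple.
--     best = {}
--     for s, u, c, perc in combinations:
--         k = (s, u, c)
--         best[k] = min(perc, best.get(k, perc))
--     return sorted([(s, u, c, p) for (s, u, c), p in best.items()],
--                   key=lambda x: (x[0] + x[1] + x[2], x[0], x[1], x[2], x[3]))
-- ===== Notes on version B (the rewrite author's own statement) =====
-- stated objective: alternative
-- what changed: B replaces A's sort-all-then-dedup-adjacent with a single dict pass that keeps the smallest perc per (s,u,c) triple and then sorts only the one representative per triple.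
import Mathlib
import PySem

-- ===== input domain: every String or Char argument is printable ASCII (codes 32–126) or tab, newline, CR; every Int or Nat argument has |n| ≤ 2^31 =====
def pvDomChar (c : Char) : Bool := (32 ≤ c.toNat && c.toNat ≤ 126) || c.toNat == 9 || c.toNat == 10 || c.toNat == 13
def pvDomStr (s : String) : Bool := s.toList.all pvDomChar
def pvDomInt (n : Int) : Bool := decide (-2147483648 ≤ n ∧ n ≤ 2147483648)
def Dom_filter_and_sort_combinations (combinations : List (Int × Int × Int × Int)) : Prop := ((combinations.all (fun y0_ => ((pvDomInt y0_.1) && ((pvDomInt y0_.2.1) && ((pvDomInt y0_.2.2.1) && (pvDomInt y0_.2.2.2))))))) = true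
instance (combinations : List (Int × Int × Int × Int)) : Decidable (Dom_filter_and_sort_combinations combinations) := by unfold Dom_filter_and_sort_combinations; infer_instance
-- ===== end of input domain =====

-- B groups in ONE dict pass (keeping the smallest perc per (s,u,c) triple) and sorts only the
-- representatives, instead of A's sort-everything-then-dedup-adjacent; objective: alternative decomposition.

-- Both Pythons sort by the tuple key (s+u+c, s, u, c, perc); the port encodes that tuple into one
-- integer in base 2^36, which is EXACT (same lexicographic order, injective) on Dom's |n| ≤ 2^31 bound.
def pvKey (x : Int × Int × Int × Int) : Int :=
  ((((x.1 + x.2.1 + x.2.2.1) * 68719476736 + x.1) * 68719476736 + x.2.1) * 68719476736 + x.2.2.1) * 68719476736 + x.2.2.2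

-- ===== PORT A =====
def filter_and_sort_combinations (combinations : List (Int × Int × Int × Int)) : List (Int × Int × Int × Int) :=
  if combinations = [] then []
  else
    let sorted_combinations := PySem.List.sorted combinations pvKey
    (sorted_combinations.foldl
      (fun (st : List (Int × Int × Int × Int) × Option (Int × Int × Int)) x =>
        if st.2 ≠ some (x.1, x.2.1, x.2.2.1) then (st.1 ++ [x], some (x.1, x.2.1, x.2.2.1)) else st)
      ([], none)).1

-- ===== PORT B =====
def filter_and_sort_combinations_alt (combinations : List (Int × Int × Int × Int)) : List (Int × Int × Int × Int) :=
  let best : PySem.Dict (Int × Int × Int) Int :=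
    combinations.foldl
      (fun d x => d.insert (x.1, x.2.1, x.2.2.1) (min x.2.2.2 (d.getD (x.1, x.2.1, x.2.2.1) x.2.2.2)))
      PySem.Dict.empty
  PySem.List.sorted (best.items.map (fun kv => (kv.1.1, kv.1.2.1, kv.1.2.2, kv.2))) pvKey

-- ===== PRECONDITION & SPEC =====
def Spec_filter_and_sort_combinations (combinations : List (Int × Int × Int × Int)) (out : List (Int × Int × Int × Int)) : Prop := out = filter_and_sort_combinations_alt combinations
instance (combinations : List (Int × Int × Int × Int)) (out : List (Int × Int × Int × Int)) : Decidable (Spec_filter_and_sort_combinations combinations out) := by unfold Spec_filter_and_sort_combinations; infer_instance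

-- ===== CLAIM (what is proved, stated in full; the proofs are below) =====
def Claim_equal_filter_and_sort_combinations : Prop := ∀ (combinations : List (Int × Int × Int × Int)), Dom_filter_and_sort_combinations combinations → Spec_filter_and_sort_combinations combinations (filter_and_sort_combinations combinations)

-- ===== LEMMAS AND PROOFS =====

def pvTriple (x : Int × Int × Int × Int) : Int × Int × Int := (x.1, x.2.1, x.2.2.1)

def pvP (x : Int × Int × Int × Int) : Int :=
  (((x.1 + x.2.1 + x.2.2.1) * 68719476736 + x.1) * 68719476736 + x.2.1) * 68719476736 + x.2.2.1

def pvB (x : Int × Int × Int × Int) : Prop :=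
  -2147483648 ≤ x.1 ∧ x.1 ≤ 2147483648 ∧ -2147483648 ≤ x.2.1 ∧ x.2.1 ≤ 2147483648 ∧
  -2147483648 ≤ x.2.2.1 ∧ x.2.2.1 ≤ 2147483648 ∧ -2147483648 ≤ x.2.2.2 ∧ x.2.2.2 ≤ 2147483648

theorem pvKey_decomp (x : Int × Int × Int × Int) : pvKey x = pvP x * 68719476736 + x.2.2.2 := rfl

theorem pv_lex_le (P Q r s : Int) (h1 : -2147483648 ≤ r) (h2 : r ≤ 2147483648)
    (h3 : -2147483648 ≤ s) (h4 : s ≤ 2147483648)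
    (h : P * 68719476736 + r ≤ Q * 68719476736 + s) : P ≤ Q := by omega

theorem pv_lex_eq (P Q r s : Int) (h1 : -2147483648 ≤ r) (h2 : r ≤ 2147483648)
    (h3 : -2147483648 ≤ s) (h4 : s ≤ 2147483648)
    (h : P * 68719476736 + r = Q * 68719476736 + s) : P = Q ∧ r = s := by omega

theorem pvP_congr (x y : Int × Int × Int × Int) (h : pvTriple x = pvTriple y) : pvP x = pvP y := by
  obtain ⟨a, b, c, d⟩ := x; obtain ⟨a', b', c', d'⟩ := y
  simp only [pvTriple, Prod.mk.injEq] at h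
  simp [pvP, h.1, h.2.1, h.2.2]

theorem pvP_inj (x y : Int × Int × Int × Int) (hx : pvB x) (hy : pvB y) (h : pvP x = pvP y) :
    pvTriple x = pvTriple y := by
  obtain ⟨a, b, c, d⟩ := x; obtain ⟨a', b', c', d'⟩ := y
  obtain ⟨x1, x2, x3, x4, x5, x6, -, -⟩ := hx
  obtain ⟨y1, y2, y3, y4, y5, y6, -, -⟩ := hy
  simp only [pvP] at h
  obtain ⟨h3, hc⟩ := pv_lex_eq _ _ c c' x5 x6 y5 y6 h
  obtain ⟨h2, hb⟩ := pv_lex_eq _ _ b b' x3 x4 y3 y4 h3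
  obtain ⟨-, ha⟩ := pv_lex_eq _ _ a a' x1 x2 y1 y2 h2
  simp [pvTriple, ha, hb, hc]

theorem pvTriple_perc_ext (x y : Int × Int × Int × Int) (h : pvTriple x = pvTriple y)
    (h4 : x.2.2.2 = y.2.2.2) : x = y := by
  obtain ⟨a, b, c, d⟩ := x; obtain ⟨a', b', c', d'⟩ := y
  simp only [pvTriple, Prod.mk.injEq] at h ⊢
  exact ⟨h.1, h.2.1, h.2.2, h4⟩

theorem pvKey_inj (x y : Int × Int × Int × Int) (hx : pvB x) (hy : pvB y)
    (h : pvKey x = pvKey y) : x = y := by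
  rw [pvKey_decomp, pvKey_decomp] at h
  obtain ⟨hP, hd⟩ := pv_lex_eq _ _ _ _ hx.2.2.2.2.2.2.1 hx.2.2.2.2.2.2.2
    hy.2.2.2.2.2.2.1 hy.2.2.2.2.2.2.2 h
  exact pvTriple_perc_ext x y (pvP_inj x y hx hy hP) hd

theorem pvKey_le_same_triple (x y : Int × Int × Int × Int) (h : pvTriple x = pvTriple y) :
    pvKey x ≤ pvKey y ↔ x.2.2.2 ≤ y.2.2.2 := by
  rw [pvKey_decomp, pvKey_decomp, pvP_congr x y h]
  omega

theorem pvKey_squeeze (x y z : Int × Int × Int × Int) (hx : pvB x) (hy : pvB y) (hz : pvB z)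
    (ht : pvTriple x = pvTriple y) (h1 : pvKey x ≤ pvKey z) (h2 : pvKey z ≤ pvKey y) :
    pvTriple z = pvTriple x := by
  rw [pvKey_decomp, pvKey_decomp] at h1 h2
  have p1 : pvP x ≤ pvP z := pv_lex_le _ _ _ _ hx.2.2.2.2.2.2.1 hx.2.2.2.2.2.2.2
    hz.2.2.2.2.2.2.1 hz.2.2.2.2.2.2.2 h1
  have p2 : pvP z ≤ pvP y := pv_lex_le _ _ _ _ hz.2.2.2.2.2.2.1 hz.2.2.2.2.2.2.2
    hy.2.2.2.2.2.2.1 hy.2.2.2.2.2.2.2 h2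
  have pxy : pvP x = pvP y := pvP_congr x y ht
  exact pvP_inj z x hz hx (le_antisymm (pxy ▸ p2) p1)

def pvGo : Option (Int × Int × Int) → List (Int × Int × Int × Int) → List (Int × Int × Int × Int)
  | _, [] => []
  | last, x :: xs =>
    if last ≠ some (pvTriple x) then x :: pvGo (some (pvTriple x)) xs else pvGo last xs

def pvGmin : List (Int × Int × Int × Int) → (Int × Int × Int) → Option Int
  | [], _ => none
  | x :: l, k =>
    if pvTriple x = k then
      match pvGmin l k with
      | none => some x.2.2.2
      | some m => some (min x.2.2.2 m)
    else pvGmin l k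

def pvMin (l : List (Int × Int × Int × Int)) (x : Int × Int × Int × Int) : Prop :=
  x ∈ l ∧ ∀ y ∈ l, pvTriple y = pvTriple x → x.2.2.2 ≤ y.2.2.2

theorem pvGo_foldl (xs : List (Int × Int × Int × Int))
    (acc : List (Int × Int × Int × Int)) (last : Option (Int × Int × Int)) :
    (xs.foldl
      (fun (st : List (Int × Int × Int × Int) × Option (Int × Int × Int)) x =>
        if st.2 ≠ some (x.1, x.2.1, x.2.2.1) then (st.1 ++ [x], some (x.1, x.2.1, x.2.2.1)) else st)
      (acc, last)).1 = acc ++ pvGo last xs := by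
  induction xs generalizing acc last with
  | nil => simp [pvGo]
  | cons x xs ih =>
    simp only [List.foldl_cons]
    by_cases h : last ≠ some (pvTriple x)
    · rw [if_pos (by simpa [pvTriple] using h), ih]
      have hr : pvGo last (x :: xs) = x :: pvGo (some (pvTriple x)) xs := by
        simp only [pvGo]; rw [if_pos h]
      rw [hr]
      simp [pvTriple]
    · rw [if_neg (by simpa [pvTriple] using h), ih]
      have hr : pvGo last (x :: xs) = pvGo last xs := by
        simp only [pvGo]; rw [if_neg h]
      rw [hr]

theorem pvGo_some (t : Int × Int × Int) (xs : List (Int × Int × Int × Int)) :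
    pvGo (some t) xs = pvGo none (xs.dropWhile (fun y => pvTriple y == t)) := by
  induction xs with
  | nil => simp [pvGo]
  | cons x xs ih =>
    by_cases h : pvTriple x = t
    · simp [pvGo, h, ih]
    · simp [pvGo, h, Ne.symm h]

theorem pvDropWhile_head_false {α : Type} (p : α → Bool) (xs : List α)
    (h : α) (t' : List α) (hd : xs.dropWhile p = h :: t') : p h = false := by
  induction xs with
  | nil => simp [List.dropWhile] at hd
  | cons x xs ih =>
    rw [List.dropWhile_cons] at hd
    by_cases hp : p x
    · exact ih (by simpa [hp] using hd)
    · rw [if_neg hp] at hd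
      rw [List.cons.injEq] at hd
      rw [← hd.1]
      simpa using hp

theorem pvGmin_none (l : List (Int × Int × Int × Int)) (k : Int × Int × Int) :
    pvGmin l k = none ↔ ∀ y ∈ l, pvTriple y ≠ k := by
  induction l with
  | nil => simp [pvGmin]
  | cons x l ih =>
    by_cases h : pvTriple x = k
    · simp only [pvGmin, if_pos h]
      constructor
      · intro hc; exfalso; revert hc; cases pvGmin l k <;> simp
      · intro hc; exact absurd h (hc x (by simp))
    · simp only [pvGmin, if_neg h]
      rw [ih]
      constructor
      · intro hc y hy
        rcases List.mem_cons.mp hy with rfl | hy'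
        · exact h
        · exact hc y hy'
      · intro hc y hy; exact hc y (List.mem_cons_of_mem _ hy)

theorem pvGmin_mem (l : List (Int × Int × Int × Int)) (k : Int × Int × Int) (v : Int)
    (h : pvGmin l k = some v) : ∃ y ∈ l, pvTriple y = k ∧ y.2.2.2 = v := by
  induction l generalizing v with
  | nil => simp [pvGmin] at h
  | cons x l ih =>
    by_cases hx : pvTriple x = k
    · simp only [pvGmin, if_pos hx] at h
      cases hg : pvGmin l k with
      | none =>
        rw [hg] at h; simp only [Option.some.injEq] at h
        exact ⟨x, by simp, hx, h⟩
      | some m =>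
        rw [hg] at h; simp only [Option.some.injEq] at h
        rcases le_total x.2.2.2 m with hle | hle
        · exact ⟨x, by simp, hx, by omega⟩
        · obtain ⟨y, hy, hyk, hyv⟩ := ih m hg
          exact ⟨y, List.mem_cons_of_mem _ hy, hyk, by omega⟩
    · simp only [pvGmin, if_neg hx] at h
      obtain ⟨y, hy, hyk, hyv⟩ := ih v h
      exact ⟨y, List.mem_cons_of_mem _ hy, hyk, hyv⟩

theorem pvGmin_le (l : List (Int × Int × Int × Int)) (k : Int × Int × Int) (v : Int)
    (h : pvGmin l k = some v) : ∀ y ∈ l, pvTriple y = k → v ≤ y.2.2.2 := by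
  induction l generalizing v with
  | nil => simp
  | cons x l ih =>
    intro y hy hyk
    by_cases hx : pvTriple x = k
    · simp only [pvGmin, if_pos hx] at h
      cases hg : pvGmin l k with
      | none =>
        rw [hg] at h; simp only [Option.some.injEq] at h
        rcases List.mem_cons.mp hy with rfl | hy'
        · omega
        · exact absurd hyk ((pvGmin_none l k).mp hg y hy')
      | some m =>
        rw [hg] at h; simp only [Option.some.injEq] at h
        rcases List.mem_cons.mp hy with rfl | hy'
        · omega
        · have := ih m hg y hy' hyk; omega
    · simp only [pvGmin, if_neg hx] at h
      rcases List.mem_cons.mp hy with rfl | hy'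
      · exact absurd hyk hx
      · exact ih v h y hy' hyk

theorem pvGmin_of (l : List (Int × Int × Int × Int)) (k : Int × Int × Int) (v : Int)
    (hmem : ∃ y ∈ l, pvTriple y = k ∧ y.2.2.2 = v)
    (hle : ∀ y ∈ l, pvTriple y = k → v ≤ y.2.2.2) : pvGmin l k = some v := by
  obtain ⟨y0, hy0, hy0k, hy0v⟩ := hmem
  cases hg : pvGmin l k with
  | none => exact absurd hy0k ((pvGmin_none l k).mp hg y0 hy0)
  | some v' =>
    obtain ⟨y1, hy1, hy1k, hy1v⟩ := pvGmin_mem l k v' hg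
    have h1 := pvGmin_le l k v' hg y0 hy0 hy0k
    have h2 := hle y1 hy1 hy1k
    simp only [Option.some.injEq]
    omega

theorem pvDict_fold_get? (l : List (Int × Int × Int × Int))
    (d : PySem.Dict (Int × Int × Int) Int) (k : Int × Int × Int) :
    (l.foldl
      (fun d x => d.insert (x.1, x.2.1, x.2.2.1) (min x.2.2.2 (d.getD (x.1, x.2.1, x.2.2.1) x.2.2.2)))
      d).get? k =
    match pvGmin l k with
    | none => d.get? k
    | some m => some (match d.get? k with | none => m | some p => min p m) := by
  induction l generalizing d with
  | nil => simp [pvGmin]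
  | cons x l ih =>
    simp only [List.foldl_cons]
    rw [ih]
    by_cases hx : pvTriple x = k
    · have hx' : (x.1, x.2.1, x.2.2.1) = k := hx
      simp only [pvGmin, if_pos hx]
      rw [hx', PySem.Dict.get?_insert, if_pos rfl, PySem.Dict.getD_eq_get?_getD]
      cases hg : pvGmin l k <;> cases hd : d.get? k <;>
        simp [min_self, min_comm, min_left_comm]
    · have hx' : k ≠ (x.1, x.2.1, x.2.2.1) := fun hc => hx hc.symm
      simp only [pvGmin, if_neg hx]
      rw [PySem.Dict.get?_insert, if_neg hx']

theorem pvGoA (n : Nat) : ∀ (l : List (Int × Int × Int × Int)), l.length ≤ n →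
    (∀ x ∈ l, pvB x) → l.Pairwise (fun a b => pvKey a ≤ pvKey b) →
    (pvGo none l).Pairwise (fun a b => pvKey a < pvKey b) ∧
    (∀ x, x ∈ pvGo none l ↔ pvMin l x) := by
  induction n with
  | zero =>
    intro l hl _ _
    have : l = [] := List.eq_nil_of_length_eq_zero (by omega)
    subst this
    simp [pvGo, pvMin]
  | succ n ih =>
    intro l hl hb hs
    cases l with
    | nil => simp [pvGo, pvMin]
    | cons a xs =>
      have hgo : pvGo none (a :: xs) =
          a :: pvGo none (xs.dropWhile (fun y => pvTriple y == pvTriple a)) := by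
        rw [show pvGo none (a :: xs) = a :: pvGo (some (pvTriple a)) xs from by simp [pvGo]]
        rw [pvGo_some]
      set p : (Int × Int × Int × Int) → Bool := fun y => pvTriple y == pvTriple a with hp
      set ys := xs.dropWhile p with hys
      have hsub : ys.Sublist xs := List.dropWhile_sublist p
      have hysxs : ∀ z ∈ ys, z ∈ xs := fun z hz => hsub.mem hz
      have hpxs : xs.Pairwise (fun a b => pvKey a ≤ pvKey b) := (List.pairwise_cons.mp hs).2
      have hka : ∀ y ∈ xs, pvKey a ≤ pvKey y := (List.pairwise_cons.mp hs).1
      have hba : pvB a := hb a (by simp)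
      have hbxs : ∀ x ∈ xs, pvB x := fun x hx => hb x (List.mem_cons_of_mem _ hx)
      have hpys : ys.Pairwise (fun a b => pvKey a ≤ pvKey b) := hpxs.sublist hsub
      have hbys : ∀ x ∈ ys, pvB x := fun x hx => hbxs x (hysxs x hx)
      have hdec : xs.takeWhile p ++ ys = xs := List.takeWhile_append_dropWhile
      have htw : ∀ y ∈ xs.takeWhile p, pvTriple y = pvTriple a := by
        intro y hy
        simpa [hp] using List.mem_takeWhile_imp hy
      have hno : ∀ z ∈ ys, pvTriple z ≠ pvTriple a := by
        cases hysc : ys with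
        | nil => simp
        | cons h t =>
          have hdw : xs.dropWhile p = h :: t := by rw [← hys]; exact hysc
          have hh : pvTriple h ≠ pvTriple a := by
            have := pvDropWhile_head_false p xs h t hdw
            rw [hp] at this
            simpa using this
          intro z hz htz
          have hhin : h ∈ ys := by rw [hysc]; simp
          have hzys : z ∈ ys := by rw [hysc]; exact hz
          rcases List.mem_cons.mp hz with rfl | hz'
          · exact hh htz
          · have hkhz : pvKey h ≤ pvKey z := by
              have hp' := hpys
              rw [hysc] at hp'
              exact (List.pairwise_cons.mp hp').1 z hz'
            have hkah : pvKey a ≤ pvKey h := hka h (hysxs h hhin)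
            exact hh (pvKey_squeeze a z h hba (hbxs z (hysxs z hzys)) (hbxs h (hysxs h hhin))
              htz.symm hkah hkhz)
      have hlen : ys.length ≤ n := by
        have h1 := hsub.length_le
        simp only [List.length_cons] at hl
        omega
      obtain ⟨ihp, ihm⟩ := ih ys hlen hbys hpys
      constructor
      · rw [hgo]
        refine List.pairwise_cons.mpr ⟨?_, ihp⟩
        intro z hz
        have hzys : z ∈ ys := ((ihm z).mp hz).1
        have hle := hka z (hysxs z hzys)
        rcases lt_or_eq_of_le hle with hlt | heq
        · exact hlt
        · exact absurd (congrArg pvTriple (pvKey_inj a z hba (hbys z hzys) heq).symm)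
            (hno z hzys)
      · intro x
        rw [hgo, List.mem_cons, ihm x]
        constructor
        · rintro (rfl | hm)
          · refine ⟨by simp, ?_⟩
            intro y hy hyt
            rcases List.mem_cons.mp hy with rfl | hy'
            · exact le_refl _
            · exact (pvKey_le_same_triple x y hyt.symm).mp (hka y hy')
          · obtain ⟨hxys, hxmin⟩ := hm
            have hxa : pvTriple x ≠ pvTriple a := hno x hxys
            refine ⟨List.mem_cons_of_mem _ (hysxs x hxys), ?_⟩
            intro y hy hyt
            rcases List.mem_cons.mp hy with rfl | hy'
            · exact absurd hyt.symm hxa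
            · rw [← hdec] at hy'
              rcases List.mem_append.mp hy' with hyt' | hyy
              · exact absurd ((htw y hyt').symm.trans hyt).symm hxa
              · exact hxmin y hyy hyt
        · rintro ⟨hxmem, hxmin⟩
          rcases List.mem_cons.mp hxmem with rfl | hxxs
          · exact Or.inl rfl
          · by_cases hxt : pvTriple x = pvTriple a
            · left
              have h1 : a.2.2.2 ≤ x.2.2.2 := (pvKey_le_same_triple a x hxt.symm).mp (hka x hxxs)
              have h2 : x.2.2.2 ≤ a.2.2.2 := hxmin a (by simp) hxt.symm
              exact pvTriple_perc_ext x a hxt (by omega)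
            · right
              have hxys : x ∈ ys := by
                rw [← hdec] at hxxs
                rcases List.mem_append.mp hxxs with h | h
                · exact absurd (htw x h) hxt
                · exact h
              exact ⟨hxys, fun y hy hyt => hxmin y (List.mem_cons_of_mem _ (hysxs y hy)) hyt⟩

theorem pvPhi_inj : Function.Injective
    (fun kv : (Int × Int × Int) × Int => (kv.1.1, kv.1.2.1, kv.1.2.2, kv.2)) := by
  rintro ⟨⟨a, b, c⟩, p⟩ ⟨⟨a', b', c'⟩, p'⟩ h
  simp only [Prod.mk.injEq] at h ⊢
  exact ⟨⟨h.1, h.2.1, h.2.2.1⟩, h.2.2.2⟩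

-- ===== VERDICT (by name: the statement is the Claim_ definition above) =====
theorem filter_and_sort_combinations_spec : Claim_equal_filter_and_sort_combinations := by
  intro combos hdom
  unfold Spec_filter_and_sort_combinations
  by_cases hnil : combos = []
  · subst hnil
    rfl
  · have hb : ∀ x ∈ combos, pvB x := by
      intro x hx
      have := List.all_eq_true.mp hdom x hx
      simp only [pvDomInt, Bool.and_eq_true, decide_eq_true_eq] at this
      exact ⟨this.1.1, this.1.2, this.2.1.1, this.2.1.2, this.2.2.1.1, this.2.2.1.2,
        this.2.2.2.1, this.2.2.2.2⟩
    have hnodk : ((combos.foldl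
        (fun d x => d.insert (x.1, x.2.1, x.2.2.1)
          (min x.2.2.2 (d.getD (x.1, x.2.1, x.2.2.1) x.2.2.2)))
        PySem.Dict.empty).keys).Nodup :=
      PySem.Dict.nodup_keys_foldl_insert_key combos (fun x => (x.1, x.2.1, x.2.2.1))
        (fun d x => min x.2.2.2 (d.getD (x.1, x.2.1, x.2.2.1) x.2.2.2))
        PySem.Dict.empty PySem.Dict.nodup_keys_empty
    have hget : ∀ k, ((combos.foldl
        (fun d x => d.insert (x.1, x.2.1, x.2.2.1)
          (min x.2.2.2 (d.getD (x.1, x.2.1, x.2.2.1) x.2.2.2)))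
        PySem.Dict.empty).get? k) = pvGmin combos k := by
      intro k
      rw [pvDict_fold_get?]
      cases pvGmin combos k <;> simp [PySem.Dict.get?_empty]
    set D := combos.foldl
      (fun d x => d.insert (x.1, x.2.1, x.2.2.1)
        (min x.2.2.2 (d.getD (x.1, x.2.1, x.2.2.1) x.2.2.2)))
      PySem.Dict.empty with hD
    set Bl := D.items.map (fun kv => (kv.1.1, kv.1.2.1, kv.1.2.2, kv.2)) with hBl
    have hmemB : ∀ x : Int × Int × Int × Int, x ∈ Bl ↔ pvGmin combos (pvTriple x) = some x.2.2.2 := by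
      intro x
      rw [hBl, List.mem_map]
      constructor
      · rintro ⟨⟨⟨a, b, c⟩, q⟩, hkv, rfl⟩
        have := (PySem.Dict.get?_eq_some_iff_mem_items D (a, b, c) q hnodk).mpr hkv
        rw [hget] at this
        exact this
      · intro h
        refine ⟨(pvTriple x, x.2.2.2), ?_, ?_⟩
        · exact (PySem.Dict.get?_eq_some_iff_mem_items D (pvTriple x) x.2.2.2 hnodk).mp
            (by rw [hget]; exact h)
        · obtain ⟨a, b, c, d⟩ := x; rfl
    have hminB : ∀ x, x ∈ Bl ↔ pvMin combos x := by
      intro x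
      rw [hmemB]
      constructor
      · intro h
        obtain ⟨y, hy, hyk, hyv⟩ := pvGmin_mem _ _ _ h
        have hyx : y = x := pvTriple_perc_ext y x hyk hyv
        exact ⟨hyx ▸ hy, pvGmin_le _ _ _ h⟩
      · rintro ⟨hxm, hxl⟩
        exact pvGmin_of _ _ _ ⟨x, hxm, rfl, rfl⟩ hxl
    have hndItems : D.items.Nodup := by
      have h1 : (D.items.map (fun p => p.1)).Nodup := hnodk
      exact h1.of_map
    have hndBl : Bl.Nodup := by
      rw [hBl]
      exact hndItems.map pvPhi_inj
    have hscb : ∀ x ∈ PySem.List.sorted combos pvKey, pvB x := by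
      intro x hx
      exact hb x ((PySem.List.mem_sorted combos pvKey false x).mp hx)
    have hscp : (PySem.List.sorted combos pvKey).Pairwise (fun a b => pvKey a ≤ pvKey b) :=
      PySem.List.sorted_pairwise combos pvKey
    obtain ⟨hpw, hmemA⟩ := pvGoA (PySem.List.sorted combos pvKey).length
      (PySem.List.sorted combos pvKey) le_rfl hscb hscp
    have hndA : (pvGo none (PySem.List.sorted combos pvKey)).Nodup := by
      refine hpw.imp ?_
      intro a b hab heq
      rw [heq] at hab
      exact absurd hab (lt_irrefl _)
    have hperm : (pvGo none (PySem.List.sorted combos pvKey)).Perm Bl := by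
      rw [List.perm_ext_iff_of_nodup hndA hndBl]
      intro x
      rw [hmemA x, hminB x]
      unfold pvMin
      simp only [PySem.List.mem_sorted]
    have hBeq : PySem.List.sorted Bl pvKey = pvGo none (PySem.List.sorted combos pvKey) :=
      PySem.List.sorted_eq_of_perm_of_pairwise_lt Bl _ pvKey hperm hpw
    show filter_and_sort_combinations combos = PySem.List.sorted Bl pvKey
    rw [hBeq]
    unfold filter_and_sort_combinations
    rw [if_neg hnil]
    exact pvGo_foldl (PySem.List.sorted combos pvKey) [] none
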